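-- pv_equiv track=rewrite | github.com/pypi-data/pypi-mirror-60 | packages/portmod/portmod-2.0a6.tar.gz/portmod-2.0a6/portmod/repo/use.py | satisfies_uselist
-- ===== SOURCE A (Python) =====
-- def satisfies_uselist(uselist, enabled):
--     if len(uselist) == 0:
--         return True
--
--     for flag in uselist:
--         if flag.startswith("-") and flag.lstrip("-") in enabled:
--             return False
--         elif not flag.startswith("-") and flag not in enabled:
--             return False
--
--     return True
-- ===== SOURCE B (Python) =====
-- def satisfies_uselist(uselist, enabled):
--     required = set()
--     forbidden = set()
--     for f in uselist:
--         if f.startswith("-"):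
--             forbidden.add(f.lstrip("-"))
--         else:
--             required.add(f)
--     for e in enabled:
--         if e in forbidden:
--             return False
--         required.discard(e)
--     return not required
-- ===== Notes on version B (the rewrite author's own statement) =====
-- stated objective: alternative
-- what changed: Inverts the traversal: instead of testing each use flag against enabled, B partitions uselist once into required/forbidden sets and then makes a single pass over ENABLED, failing on a forbidden hit and discharging requirements as they are seen; success iff no requirement remains.
import Mathlib
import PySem

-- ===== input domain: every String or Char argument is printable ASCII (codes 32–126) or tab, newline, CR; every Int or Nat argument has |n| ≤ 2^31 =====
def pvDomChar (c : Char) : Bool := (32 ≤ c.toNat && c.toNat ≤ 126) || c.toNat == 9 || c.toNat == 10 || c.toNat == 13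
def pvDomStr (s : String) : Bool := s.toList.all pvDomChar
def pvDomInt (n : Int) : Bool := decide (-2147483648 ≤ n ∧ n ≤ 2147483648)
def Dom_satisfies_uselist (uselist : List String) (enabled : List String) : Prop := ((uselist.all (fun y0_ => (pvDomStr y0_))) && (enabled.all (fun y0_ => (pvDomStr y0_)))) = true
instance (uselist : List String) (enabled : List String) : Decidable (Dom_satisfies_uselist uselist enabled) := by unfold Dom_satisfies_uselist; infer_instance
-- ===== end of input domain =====

-- B inverts the traversal: it partitions uselist into required/forbidden sets once, then scans
-- ENABLED, failing on a forbidden hit and discharging requirements (objective: alternative).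

-- shared helper: Python's s.lstrip("-") — drop all leading '-' characters (exact: no PySem primitive takes a chars argument for lstrip)
def lstripDash (s : String) : String := String.ofList (s.toList.dropWhile (· == '-'))

-- ===== PORT A =====
def satisfiesLoop (uselist : List String) (enabled : List String) : Bool :=
  match uselist with
  | [] => true
  | flag :: rest =>
    if PySem.Str.startswith flag "-" && (enabled.contains (lstripDash flag)) then false
    else if !PySem.Str.startswith flag "-" && !(enabled.contains flag) then false
    else satisfiesLoop rest enabled

def satisfies_uselist (uselist : List String) (enabled : List String) : Bool :=
  if uselist.length == 0 then true
  else satisfiesLoop uselist enabled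

-- ===== PORT B =====
-- first loop of Source B: partition uselist into (required, forbidden) sets
def altPartition (uselist : List String) (req forb : PySem.Set String) :
    PySem.Set String × PySem.Set String :=
  match uselist with
  | [] => (req, forb)
  | f :: rest =>
    if PySem.Str.startswith f "-" then
      altPartition rest req (PySem.Set.add forb (lstripDash f))
    else
      altPartition rest (PySem.Set.add req f) forb

-- second loop of Source B: scan enabled, short-circuit on a forbidden hit, discard requirements
def altScan (forb : PySem.Set String) (req : PySem.Set String) (enabled : List String) : Bool :=
  match enabled with
  | [] => req.isEmpty
  | e :: rest =>
    if PySem.Set.contains forb e then false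
    else altScan forb (PySem.Set.discard req e) rest

def satisfies_uselist_alt (uselist : List String) (enabled : List String) : Bool :=
  let p := altPartition uselist PySem.Set.empty PySem.Set.empty
  altScan p.2 p.1 enabled

-- ===== PRECONDITION & SPEC =====
def Spec_satisfies_uselist (uselist : List String) (enabled : List String) (out : Bool) : Prop := out = satisfies_uselist_alt uselist enabled
instance (uselist : List String) (enabled : List String) (out : Bool) : Decidable (Spec_satisfies_uselist uselist enabled out) := by unfold Spec_satisfies_uselist; infer_instance

-- ===== CLAIM (what is proved, stated in full; the proofs are below) =====
def Claim_equal_satisfies_uselist : Prop := ∀ (uselist : List String) (enabled : List String), Dom_satisfies_uselist uselist enabled → Spec_satisfies_uselist uselist enabled (satisfies_uselist uselist enabled)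

-- ===== LEMMAS AND PROOFS =====

theorem satisfiesLoop_iff (uselist enabled : List String) :
    satisfiesLoop uselist enabled = true ↔
      ∀ f ∈ uselist,
        (if PySem.Str.startswith f "-" then lstripDash f ∉ enabled else f ∈ enabled) := by
  induction uselist with
  | nil => simp [satisfiesLoop]
  | cons flag rest ih =>
    simp only [satisfiesLoop, List.mem_cons]
    cases h : PySem.Str.startswith flag "-" <;>
      cases h2 : enabled.contains (lstripDash flag) <;>
      cases h3 : enabled.contains flag <;>
      simp_all [ih, List.contains_iff_mem]

theorem mem_altPartition_fst (uselist : List String) (req forb : PySem.Set String) (x : String) :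
    x ∈ (altPartition uselist req forb).1 ↔
      x ∈ req ∨ (x ∈ uselist ∧ PySem.Str.startswith x "-" = false) := by
  induction uselist generalizing req forb with
  | nil => simp [altPartition]
  | cons f rest ih =>
    simp only [altPartition]
    split <;> rename_i h <;> rw [ih] <;>
      simp only [PySem.Set.mem_add, List.mem_cons]
    · constructor
      · rintro (h1 | ⟨h1, h2⟩) <;> tauto
      · rintro (h1 | ⟨rfl | h1, h2⟩)
        · tauto
        · rw [h2] at h; exact absurd h Bool.false_ne_true
        · tauto
    · have hf : PySem.Str.startswith f "-" = false := by
        revert h; cases PySem.Str.startswith f "-" <;> simp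
      constructor
      · rintro ((h1 | rfl) | ⟨h1, h2⟩) <;> tauto
      · rintro (h1 | ⟨rfl | h1, h2⟩) <;> tauto

theorem mem_altPartition_snd (uselist : List String) (req forb : PySem.Set String) (x : String) :
    x ∈ (altPartition uselist req forb).2 ↔
      x ∈ forb ∨ (∃ f ∈ uselist, PySem.Str.startswith f "-" = true ∧ x = lstripDash f) := by
  induction uselist generalizing req forb with
  | nil => simp [altPartition]
  | cons f rest ih =>
    simp only [altPartition]
    split <;> rename_i h <;> rw [ih] <;>
      simp only [PySem.Set.mem_add, List.mem_cons]
    · constructor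
      · rintro ((h1 | rfl) | ⟨g, hg, hs, rfl⟩)
        · tauto
        · exact Or.inr ⟨f, Or.inl rfl, h, rfl⟩
        · exact Or.inr ⟨g, Or.inr hg, hs, rfl⟩
      · rintro (h1 | ⟨g, rfl | hg, hs, rfl⟩) <;> tauto
    · constructor
      · rintro (h1 | ⟨g, hg, hs, rfl⟩)
        · tauto
        · exact Or.inr ⟨g, Or.inr hg, hs, rfl⟩
      · rintro (h1 | ⟨g, rfl | hg, hs, rfl⟩)
        · tauto
        · exact absurd hs h
        · tauto

theorem altScan_iff (forb req : PySem.Set String) (enabled : List String) :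
    altScan forb req enabled = true ↔
      (∀ e ∈ enabled, e ∉ forb) ∧ (∀ x ∈ req, x ∈ enabled) := by
  induction enabled generalizing req with
  | nil => simp [altScan, List.isEmpty_iff, List.eq_nil_iff_forall_not_mem]
  | cons e rest ih =>
    simp only [altScan]
    split <;> rename_i h
    · simp only [Bool.false_eq_true, false_iff]
      rw [PySem.Set.contains_iff] at h
      intro ⟨h1, _⟩; exact h1 e (List.mem_cons_self ..) h
    · have h' : e ∉ forb := by
        intro hm; exact h (PySem.Set.contains_iff forb e |>.mpr hm)
      rw [ih]
      constructor
      · rintro ⟨h1, h2⟩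
        refine ⟨?_, ?_⟩
        · intro x hx
          rcases List.mem_cons.mp hx with rfl | hx
          · exact h'
          · exact h1 x hx
        · intro x hx
          by_cases hxe : x = e
          · simp [hxe]
          · exact List.mem_cons_of_mem _ (h2 x (by rw [PySem.Set.mem_discard]; exact ⟨hx, hxe⟩))
      · rintro ⟨h1, h2⟩
        refine ⟨fun x hx => h1 x (List.mem_cons_of_mem _ hx), ?_⟩
        intro x hx
        rw [PySem.Set.mem_discard] at hx
        rcases List.mem_cons.mp (h2 x hx.1) with rfl | hm
        · exact absurd rfl hx.2
        · exact hm

theorem alt_iff (uselist enabled : List String) :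
    satisfies_uselist_alt uselist enabled = true ↔
      ∀ f ∈ uselist,
        (if PySem.Str.startswith f "-" then lstripDash f ∉ enabled else f ∈ enabled) := by
  rw [satisfies_uselist_alt, altScan_iff]
  simp only [mem_altPartition_fst, mem_altPartition_snd]
  constructor
  · rintro ⟨h1, h2⟩ f hf
    cases hs : PySem.Str.startswith f "-"
    · simp only [Bool.false_eq_true, if_false]
      exact h2 f (Or.inr ⟨hf, hs⟩)
    · simp only [if_true]
      intro hmem
      exact h1 _ hmem (Or.inr ⟨f, hf, hs, rfl⟩)
  · intro h
    constructor
    · rintro e he (h1 | ⟨f, hf, hs, rfl⟩)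
      · simp [PySem.Set.empty] at h1
      · have := h f hf; rw [if_pos hs] at this; exact this he
    · rintro x (h1 | ⟨hx, hs⟩)
      · simp [PySem.Set.empty] at h1
      · have := h x hx; rw [hs] at this; simpa using this

-- ===== VERDICT (by name: the statement is the Claim_ definition above) =====
theorem satisfies_uselist_spec : Claim_equal_satisfies_uselist := by
  intro uselist enabled _
  show satisfies_uselist uselist enabled = satisfies_uselist_alt uselist enabled
  rw [Bool.eq_iff_iff]
  rw [alt_iff, satisfies_uselist]
  rcases uselist with _ | ⟨f, rest⟩
  · simp
  · rw [if_neg (by simp)]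
    exact satisfiesLoop_iff _ _
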